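-- pv_equiv track=rewrite | github.com/odrykrisztina/OdryKrisztina_H86L47 | line_detector.py | find_connected_lines
-- ===== SOURCE A (Python) =====
-- def find_connected_lines(start_idx, parallel_groups):
--     """
--     Args:
--         start_idx: Kezdő vonal indexe
--         parallel_groups: Párhuzamos vonalak csoportjai (szótár: index -> párhuzamos vonalak indexei)
--
--     Returns:
--         set: Az összefüggő vonalak indexeinek halmaza
--     """
--
--     # Összefüggő vonalak halmaza
--     connected = set()
--
--     # Feldolgozásra váró vonalak
--     to_process = {start_idx}
--
--     # Amíg van feldolgozandó vonal
--     while to_process: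
--         current_idx = to_process.pop()
--         if current_idx in connected:
--             continue
--
--         # Aktuális vonal hozzáadása a kapcsolódó vonalakhoz
--         connected.add(current_idx)
--
--         # Párhuzamos vonalak hozzáadása a feldolgozandó vonalakhoz
--         for parallel_idx in parallel_groups.get(current_idx, set()):
--             if parallel_idx not in connected:
--                 to_process.add(parallel_idx)
--
--     return connected
-- ===== SOURCE B (Python) =====
-- def find_connected_lines(start_idx, parallel_groups):
--     # Round-based fixpoint closure: no frontier/worklist at all. Each round
--     # rescans the entire current list and appends every newly reachable
--     # neighbour; stop when a whole round adds nothing.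
--     connected = [start_idx]
--     while True:
--         expanded = list(connected)
--         for x in connected:
--             for y in parallel_groups.get(x, ()):
--                 if y not in expanded:
--                     expanded.append(y)
--         if len(expanded) == len(connected):
--             return set(connected)
--         connected = expanded
-- ===== Notes on version B (the rewrite author's own statement) =====
-- stated objective: alternative
-- what changed: Replaced A's frontier/worklist traversal (a to_process set popped one node at a time next to a connected set) by a frontierless round-based fixpoint closure: each round rescans the whole current list and appends all newly reachable neighbours, stopping when a round adds nothing.
import Mathlib
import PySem

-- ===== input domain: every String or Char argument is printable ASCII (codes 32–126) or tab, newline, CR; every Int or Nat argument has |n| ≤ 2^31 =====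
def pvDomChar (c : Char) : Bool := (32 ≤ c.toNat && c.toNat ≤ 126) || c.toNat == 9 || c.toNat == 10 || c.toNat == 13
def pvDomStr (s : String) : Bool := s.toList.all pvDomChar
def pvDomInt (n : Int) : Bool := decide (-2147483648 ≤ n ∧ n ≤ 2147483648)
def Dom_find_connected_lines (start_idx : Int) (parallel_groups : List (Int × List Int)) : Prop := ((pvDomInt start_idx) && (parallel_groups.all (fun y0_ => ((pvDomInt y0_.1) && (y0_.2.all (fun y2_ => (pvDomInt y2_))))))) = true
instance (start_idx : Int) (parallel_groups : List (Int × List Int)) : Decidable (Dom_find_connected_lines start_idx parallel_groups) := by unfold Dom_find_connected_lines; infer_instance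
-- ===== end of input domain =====

-- B replaces A's frontier/worklist traversal by a frontierless round-based fixpoint
-- closure (rescan the whole list each round, stop when a round adds nothing);
-- objective: alternative (B is not faster).
-- Both Pythons return Python sets (orderless); the ports realise them as duplicate-free lists.

-- fuel bound used by both fueled loops: strictly more than the number of loop iterations
-- (at most 1 + Σ|value lists| distinct nodes ever appear, so A pops ≤ 1 + Σ nodes and
-- B's list grows by ≥ 1 per non-final round)
def pvFuel (parallel_groups : List (Int × List Int)) : Nat :=
  2 + parallel_groups.foldl (fun a p => a + p.2.length) 0

-- ===== PORT A =====
-- while to_process: pop (ported as: pop the first element; Python's set.pop order is unspecified,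
-- and the returned value is a set, so the choice is unobservable), continue-if-seen, add to
-- connected, enqueue unseen neighbours.  fuel only makes the loop total; it never runs out.
def pvALoop (pg : List (Int × List Int)) : Nat → List Int → List Int → List Int
  | 0, connected, _ => connected
  | fuel+1, connected, to_process =>
    match to_process with
    | [] => connected
    | x :: rest =>
      if connected.contains x then pvALoop pg fuel connected rest
      else
        pvALoop pg fuel (PySem.Set.add connected x)
          (((PySem.Dict.mk pg).getD x []).foldl
            (fun q y => if PySem.Set.contains (PySem.Set.add connected x) y then q
                        else PySem.Set.add q y) rest)

def find_connected_lines (start_idx : Int) (parallel_groups : List (Int × List Int)) : List Int :=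
  pvALoop parallel_groups (pvFuel parallel_groups) [] (PySem.Set.ofList [start_idx])

-- ===== PORT B =====
-- helpers naming Source B's inner loops: append y if unseen; one x's neighbour pass
def pvAddNew (acc : List Int) (y : Int) : List Int :=
  if acc.contains y then acc else acc ++ [y]
def pvNbrs (pg : List (Int × List Int)) (x : Int) : List Int :=
  (PySem.Dict.mk pg).getD x []
def pvExpand1 (pg : List (Int × List Int)) (acc : List Int) (x : Int) : List Int :=
  (pvNbrs pg x).foldl pvAddNew acc

-- while True: expanded := one full pass over connected appending unseen neighbours;
-- if nothing was added return set(connected) else continue with expanded.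
-- fuel only makes the while loop total; on exhaustion (unreachable) the current list is returned.
def pvBFix (pg : List (Int × List Int)) : Nat → List Int → List Int
  | 0, connected => connected
  | fuel+1, connected =>
    if (connected.foldl (pvExpand1 pg) connected).length = connected.length
    then PySem.Set.ofList connected
    else pvBFix pg fuel (connected.foldl (pvExpand1 pg) connected)

def find_connected_lines_alt (start_idx : Int) (parallel_groups : List (Int × List Int)) : List Int :=
  pvBFix parallel_groups (pvFuel parallel_groups) [start_idx]

-- ===== PRECONDITION & SPEC =====
def Spec_find_connected_lines (start_idx : Int) (parallel_groups : List (Int × List Int)) (out : List Int) : Prop := out = find_connected_lines_alt start_idx parallel_groups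
instance (start_idx : Int) (parallel_groups : List (Int × List Int)) (out : List Int) : Decidable (Spec_find_connected_lines start_idx parallel_groups out) := by unfold Spec_find_connected_lines; infer_instance

-- ===== CLAIM (what is proved, stated in full; the proofs are below) =====
def Claim_equal_find_connected_lines : Prop := ∀ (start_idx : Int) (parallel_groups : List (Int × List Int)), Dom_find_connected_lines start_idx parallel_groups → Spec_find_connected_lines start_idx parallel_groups (find_connected_lines start_idx parallel_groups)

-- ===== LEMMAS AND PROOFS =====

-- proof-side middleman: the growing-list scan loop (visit list doubling as BFS queue)
def pvScan (pg : List (Int × List Int)) : Nat → List Int → Nat → List Int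
  | 0, order, i => order.take i
  | fuel+1, order, i =>
    if i < order.length then pvScan pg fuel (pvExpand1 pg order (order.getD i 0)) (i+1)
    else PySem.Set.ofList order

def pvAll (pg : List (Int × List Int)) : List Int := pg.flatMap Prod.snd

def pvInv (s : Int) (pg : List (Int × List Int)) (order : List Int) : Prop :=
  order.Nodup ∧ ∀ x ∈ order, x ∈ s :: pvAll pg

def pvClosed (pg : List (Int × List Int)) (order : List Int) (i : Nat) : Prop :=
  ∀ x ∈ order.take i, ∀ y ∈ pvNbrs pg x, y ∈ order

-- ---- part 1: A's worklist loop equals pvScan (fuel-synchronized)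

-- foldl of Set.add over a Nodup extension appends the list unchanged
lemma pv_foldl_add_nodup : ∀ (l s : List Int), (s ++ l).Nodup →
    l.foldl PySem.Set.add s = s ++ l := by
  intro l
  induction l with
  | nil => intro s _; simp
  | cons a t ih =>
    intro s h
    have ha : a ∉ s := by
      intro hmem
      exact (List.nodup_append.mp h).2.2 a hmem a (by simp) rfl
    have hadd : PySem.Set.add s a = s ++ [a] := by
      simp [PySem.Set.add, PySem.Set.contains, ha]
    have h' : ((s ++ [a]) ++ t).Nodup := by
      simpa [List.append_assoc] using h
    simpa [List.foldl_cons, hadd, List.append_assoc] using ih (s ++ [a]) h'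

lemma pv_ofList_nodup (l : List Int) (h : l.Nodup) : PySem.Set.ofList l = l := by
  have := pv_foldl_add_nodup l [] (by simpa using h)
  simpa [PySem.Set.ofList_eq_foldl] using this

-- the two neighbour folds agree: A keeps (c, q) with c fixed, B keeps c ++ q
lemma pv_fold_eq (c : List Int) : ∀ (nbrs q : List Int), (c ++ q).Nodup →
    (nbrs.foldl pvAddNew (c ++ q)
      = c ++ nbrs.foldl (fun q y => if PySem.Set.contains c y then q else PySem.Set.add q y) q)
    ∧ (c ++ nbrs.foldl (fun q y => if PySem.Set.contains c y then q else PySem.Set.add q y) q).Nodup := by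
  intro nbrs
  induction nbrs with
  | nil => intro q h; exact ⟨rfl, h⟩
  | cons y t ih =>
    intro q h
    rw [List.foldl_cons, List.foldl_cons]
    by_cases hc : y ∈ c
    · have hacc : pvAddNew (c ++ q) y = c ++ q := by simp [pvAddNew, hc]
      have hcc : PySem.Set.contains c y = true := by simp [PySem.Set.contains, hc]
      rw [hacc, if_pos hcc]
      exact ih q h
    · have hcc : ¬ PySem.Set.contains c y = true := by simp [PySem.Set.contains, hc]
      by_cases hq : y ∈ q
      · have hacc : pvAddNew (c ++ q) y = c ++ q := by simp [pvAddNew, hq]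
        have hadd : PySem.Set.add q y = q := by
          simp [PySem.Set.add, PySem.Set.contains, hq]
        rw [hacc, if_neg hcc, hadd]
        exact ih q h
      · have hacc : pvAddNew (c ++ q) y = (c ++ q) ++ [y] := by simp [pvAddNew, hc, hq]
        have hadd : PySem.Set.add q y = q ++ [y] := by
          simp [PySem.Set.add, PySem.Set.contains, hq]
        rw [hacc, if_neg hcc, hadd]
        have h' : (c ++ (q ++ [y])).Nodup := by
          rw [← List.append_assoc]
          refine List.Nodup.append h (by simp) ?_
          intro a ha hb
          have hay : a = y := by simpa using hb
          subst hay
          rcases List.mem_append.mp ha with h1 | h2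
          · exact hc h1
          · exact hq h2
        have := ih (q ++ [y]) h'
        rw [List.append_assoc]
        exact this

-- main invariant: A's (connected, queue) corresponds to pvScan's (connected ++ queue, |connected|)
lemma pv_loop_eq (pg : List (Int × List Int)) : ∀ (fuel : Nat) (connected queue : List Int),
    (connected ++ queue).Nodup →
    pvALoop pg fuel connected queue = pvScan pg fuel (connected ++ queue) connected.length := by
  intro fuel
  induction fuel with
  | zero => intro c q _; simp [pvALoop, pvScan]
  | succ n ih =>
    intro c q h
    match q with
    | [] =>
      simp [pvALoop, pvScan, pv_ofList_nodup c (by simpa using h)]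
    | x :: rest =>
      have hx : x ∉ c := by
        intro hmem
        exact (List.nodup_append.mp h).2.2 x hmem x (by simp) rfl
      have hcx : ¬ List.contains c x = true := by simp [hx]
      have hlt : c.length < (c ++ x :: rest).length := by simp
      have hget : (c ++ x :: rest).getD c.length 0 = x := by
        simp [List.getD]
      have hadd : PySem.Set.add c x = c ++ [x] := by
        simp [PySem.Set.add, PySem.Set.contains, hx]
      have hnd : ((c ++ [x]) ++ rest).Nodup := by simpa [List.append_assoc] using h
      have hfold := pv_fold_eq (c ++ [x]) ((PySem.Dict.mk pg).getD x []) rest hnd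
      rw [pvALoop, pvScan]
      rw [if_neg hcx, if_pos hlt, hget, hadd]
      have horder : (c ++ x :: rest) = (c ++ [x]) ++ rest := by simp
      rw [horder]
      unfold pvExpand1 pvNbrs
      rw [hfold.1, ih (c ++ [x]) _ hfold.2]
      simp

-- ---- part 2: lemmas about pvAddNew / pvExpand1 folds

lemma pv_prefix_foldl_addNew : ∀ (l acc : List Int), acc <+: l.foldl pvAddNew acc := by
  intro l
  induction l with
  | nil => intro acc; simp
  | cons y t ih =>
    intro acc
    have h1 : acc <+: pvAddNew acc y := by
      by_cases hc : y ∈ acc <;> simp [pvAddNew, hc]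
    exact h1.trans (ih (pvAddNew acc y))

lemma pv_mem_foldl_addNew {z : Int} : ∀ (l acc : List Int),
    z ∈ l.foldl pvAddNew acc → z ∈ acc ∨ z ∈ l := by
  intro l
  induction l with
  | nil => intro acc h; exact Or.inl (by simpa using h)
  | cons y t ih =>
    intro acc h
    rcases ih (pvAddNew acc y) (by simpa using h) with h1 | h1
    · by_cases hc : y ∈ acc
      · simp [pvAddNew, hc] at h1; exact Or.inl h1
      · simp [pvAddNew, hc] at h1
        rcases h1 with h2 | h2
        · exact Or.inl h2
        · exact Or.inr (by simp [h2])
    · exact Or.inr (by simp [h1])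

lemma pv_mem_list_foldl_addNew {y : Int} : ∀ (l acc : List Int),
    y ∈ l → y ∈ l.foldl pvAddNew acc := by
  intro l
  induction l with
  | nil => intro acc h; simp at h
  | cons x t ih =>
    intro acc h
    rcases List.mem_cons.mp h with rfl | hmem
    · have hy : y ∈ pvAddNew acc y := by
        by_cases hc : y ∈ acc <;> simp [pvAddNew, hc]
      exact (pv_prefix_foldl_addNew t (pvAddNew acc y)).subset hy
    · simpa using ih (pvAddNew acc x) hmem

lemma pv_nodup_foldl_addNew : ∀ (l acc : List Int), acc.Nodup → (l.foldl pvAddNew acc).Nodup := by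
  intro l
  induction l with
  | nil => intro acc h; simpa using h
  | cons y t ih =>
    intro acc h
    have h' : (pvAddNew acc y).Nodup := by
      by_cases hc : y ∈ acc
      · simpa [pvAddNew, hc] using h
      · simp [pvAddNew, hc, List.nodup_append, h]
        exact fun a ha h' => hc (h' ▸ ha)
    simpa using ih (pvAddNew acc y) h'

lemma pv_foldl_addNew_id : ∀ (l acc : List Int), (∀ y ∈ l, y ∈ acc) → l.foldl pvAddNew acc = acc := by
  intro l
  induction l with
  | nil => intro acc _; rfl
  | cons y t ih =>
    intro acc h
    have hy : y ∈ acc := h y (by simp)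
    have h1 : pvAddNew acc y = acc := by simp [pvAddNew, hy]
    rw [List.foldl_cons, h1]
    exact ih acc (fun z hz => h z (by simp [hz]))

lemma pv_prefix_foldl_expand (pg : List (Int × List Int)) :
    ∀ (xs acc : List Int), acc <+: xs.foldl (pvExpand1 pg) acc := by
  intro xs
  induction xs with
  | nil => intro acc; simp
  | cons x t ih =>
    intro acc
    have h1 : acc <+: pvExpand1 pg acc x := pv_prefix_foldl_addNew _ acc
    exact h1.trans (ih (pvExpand1 pg acc x))

lemma pv_mem_nbrs_all (pg : List (Int × List Int)) {x y : Int}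
    (h : y ∈ pvNbrs pg x) : y ∈ pvAll pg := by
  induction pg with
  | nil => simp [pvNbrs, PySem.Dict.getD, PySem.Dict.get?] at h
  | cons p rest ih =>
    unfold pvNbrs at h
    rw [PySem.Dict.getD, PySem.Dict.get?_mk_cons] at h
    by_cases hk : (p.1 == x : Bool)
    · rw [if_pos hk] at h
      simp only [Option.getD_some] at h
      simp [pvAll, List.mem_append, h]
    · rw [if_neg hk] at h
      have : y ∈ pvNbrs rest x := by
        unfold pvNbrs; rw [PySem.Dict.getD]; exact h
      simp [pvAll, List.mem_append]
      right
      simpa [pvAll] using ih this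

lemma pv_mem_foldl_expand (pg : List (Int × List Int)) {z : Int} :
    ∀ (xs acc : List Int), z ∈ xs.foldl (pvExpand1 pg) acc → z ∈ acc ∨ z ∈ pvAll pg := by
  intro xs
  induction xs with
  | nil => intro acc h; exact Or.inl (by simpa using h)
  | cons x t ih =>
    intro acc h
    rcases ih (pvExpand1 pg acc x) (by simpa using h) with h1 | h1
    · rcases pv_mem_foldl_addNew _ _ h1 with h2 | h2
      · exact Or.inl h2
      · exact Or.inr (pv_mem_nbrs_all pg h2)
    · exact Or.inr h1

lemma pv_nodup_foldl_expand (pg : List (Int × List Int)) :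
    ∀ (xs acc : List Int), acc.Nodup → (xs.foldl (pvExpand1 pg) acc).Nodup := by
  intro xs
  induction xs with
  | nil => intro acc h; simpa using h
  | cons x t ih =>
    intro acc h
    simpa using ih (pvExpand1 pg acc x) (pv_nodup_foldl_addNew _ acc h)

lemma pv_foldl_expand_id (pg : List (Int × List Int)) :
    ∀ (xs acc : List Int), (∀ x ∈ xs, ∀ y ∈ pvNbrs pg x, y ∈ acc) →
    xs.foldl (pvExpand1 pg) acc = acc := by
  intro xs
  induction xs with
  | nil => intro acc _; rfl
  | cons x t ih =>
    intro acc h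
    have h1 : pvExpand1 pg acc x = acc :=
      pv_foldl_addNew_id _ acc (h x (by simp))
    rw [List.foldl_cons, h1]
    exact ih acc (fun z hz => h z (by simp [hz]))

lemma pv_nbrs_in_foldl_expand (pg : List (Int × List Int)) :
    ∀ (xs acc : List Int), ∀ x ∈ xs, ∀ y ∈ pvNbrs pg x, y ∈ xs.foldl (pvExpand1 pg) acc := by
  intro xs
  induction xs with
  | nil => intro acc x hx; simp at hx
  | cons x' t ih =>
    intro acc x hx y hy
    rcases List.mem_cons.mp hx with rfl | hmem
    · have h1 : y ∈ pvExpand1 pg acc x := pv_mem_list_foldl_addNew _ acc hy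
      exact (pv_prefix_foldl_expand pg t (pvExpand1 pg acc x)).subset (by simpa using h1)
    · simpa using ih (pvExpand1 pg acc x') x hmem y hy

-- ---- part 3: the chunk lemma (scan over a snapshot = one fold over it)

lemma pv_scan_chunk (pg : List (Int × List Int)) :
    ∀ (xs : List Int) (f : Nat) (order : List Int) (i : Nat) (rest : List Int),
    order.drop i = xs ++ rest →
    pvScan pg (f + xs.length) order i = pvScan pg f (xs.foldl (pvExpand1 pg) order) (i + xs.length) := by
  intro xs
  induction xs with
  | nil => intro f order i rest _; simp
  | cons x t ih =>
    intro f order i rest hdrop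
    have hlt : i < order.length := by
      by_contra hge
      rw [List.drop_eq_nil_of_le (by omega)] at hdrop
      simp at hdrop
    have hget : order.getD i 0 = x := by
      have h1 : (order.drop i)[0]'(by simp [hdrop]) = x := by simp [hdrop]
      rw [List.getElem_drop] at h1
      rw [List.getD_eq_getElem _ _ hlt, ← h1]
      congr 1
    obtain ⟨app, happ⟩ := pv_prefix_foldl_addNew (pvNbrs pg x) order
    have hexp : pvExpand1 pg order x = order ++ app := happ.symm
    have hdrop' : (pvExpand1 pg order x).drop (i+1) = t ++ (rest ++ app) := by
      rw [hexp, List.drop_append_of_le_length (by omega)]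
      have : order.drop (i+1) = t ++ rest := by
        have := congrArg (List.drop 1) hdrop
        simpa [List.drop_drop, Nat.add_comm] using this
      rw [this, List.append_assoc]
    have hstep : pvScan pg (f + (x :: t).length) order i
        = pvScan pg (f + t.length) (pvExpand1 pg order x) (i+1) := by
      have harith : f + (x :: t).length = (f + t.length) + 1 := by simp; omega
      rw [harith]
      rw [pvScan, if_pos hlt, hget]
    rw [hstep, ih (f) (pvExpand1 pg order x) (i+1) (rest ++ app) hdrop']
    have harith2 : i + (x :: t).length = (i + 1) + t.length := by simp; omega
    rw [harith2]
    simp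

lemma pv_scan_done (pg : List (Int × List Int)) (f : Nat) (order : List Int) (i : Nat)
    (h : order.length ≤ i) : pvScan pg (f+1) order i = PySem.Set.ofList order := by
  rw [pvScan, if_neg (by omega)]

-- ---- part 4: length bound from the invariant

lemma pv_foldl_len (pg : List (Int × List Int)) : ∀ (a : Nat),
    pg.foldl (fun a p => a + p.2.length) a = a + (pvAll pg).length := by
  induction pg with
  | nil => intro a; simp [pvAll]
  | cons p rest ih => intro a; simp [pvAll, List.foldl_cons, ih]; omega

lemma pv_fuel_eq (pg : List (Int × List Int)) : pvFuel pg = 2 + (pvAll pg).length := by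
  unfold pvFuel; rw [pv_foldl_len pg 0]; omega

lemma pv_nodup_sub_len {l l' : List Int} (h : l.Nodup) (hs : ∀ x ∈ l, x ∈ l') :
    l.length ≤ l'.length := by
  have h1 : l.toFinset.card = l.length := List.toFinset_card_of_nodup h
  have h2 : l.toFinset ⊆ l'.toFinset := by
    intro a ha
    simp only [List.mem_toFinset] at ha ⊢
    exact hs a ha
  have h3 : l'.toFinset.card ≤ l'.length := l'.toFinset_card_le
  have := Finset.card_le_card h2
  omega

lemma pv_inv_len {s : Int} {pg : List (Int × List Int)} {order : List Int}
    (h : pvInv s pg order) : order.length ≤ pvFuel pg - 1 := by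
  have h2 : order.length ≤ (pvAll pg).length + 1 := by
    simpa using pv_nodup_sub_len h.1 h.2
  rw [pv_fuel_eq]
  omega

-- ---- part 5: the fixpoint loop equals pvScan

lemma pv_fix_scan (s : Int) (pg : List (Int × List Int)) :
    ∀ (fb : Nat) (order : List Int) (i fs : Nat),
    pvInv s pg order → i ≤ order.length → pvClosed pg order i →
    pvFuel pg + 1 ≤ fb + order.length → pvFuel pg ≤ fs + i →
    pvBFix pg fb order = pvScan pg fs order i := by
  intro fb
  induction fb with
  | zero =>
    intro order i fs hinv _ _ hfb _
    have := pv_inv_len hinv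
    have : pvFuel pg ≥ 2 := by unfold pvFuel; omega
    omega
  | succ k ih =>
    intro order i fs hinv hi hclosed hfb hfs
    have hNlen : order.length ≤ pvFuel pg - 1 := pv_inv_len hinv
    have hfuel2 : 2 ≤ pvFuel pg := by unfold pvFuel; omega
    have hsplit : order.foldl (pvExpand1 pg) order
        = (order.drop i).foldl (pvExpand1 pg) order := by
      calc order.foldl (pvExpand1 pg) order
          = (order.take i ++ order.drop i).foldl (pvExpand1 pg) order := by
            rw [List.take_append_drop]
        _ = (order.drop i).foldl (pvExpand1 pg) ((order.take i).foldl (pvExpand1 pg) order) := by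
            rw [List.foldl_append]
        _ = (order.drop i).foldl (pvExpand1 pg) order := by
            rw [pv_foldl_expand_id pg (order.take i) order hclosed]
    obtain ⟨app, happ⟩ := pv_prefix_foldl_expand pg (order.drop i) order
    have hlenmono : order.length ≤ ((order.drop i).foldl (pvExpand1 pg) order).length := by
      rw [← happ]; simp
    have hdlen : (order.drop i).length = order.length - i := by simp
    have hchunk : pvScan pg fs order i
        = pvScan pg (fs - (order.drop i).length) ((order.drop i).foldl (pvExpand1 pg) order) order.length := by
      have h1 : fs = (fs - (order.drop i).length) + (order.drop i).length := by omega
      conv_lhs => rw [h1]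
      rw [pv_scan_chunk pg (order.drop i) _ order i [] (by simp)]
      congr 1
      omega
    rw [pvBFix]
    by_cases hsame : (order.foldl (pvExpand1 pg) order).length = order.length
    · rw [if_pos hsame]
      have hexpord : (order.drop i).foldl (pvExpand1 pg) order = order := by
        refine (List.IsPrefix.eq_of_length ⟨app, happ⟩ ?_).symm
        rw [← hsplit]
        omega
      rw [hchunk, hexpord]
      obtain ⟨m, hm⟩ : ∃ m, fs - (order.drop i).length = m + 1 :=
        ⟨fs - (order.drop i).length - 1, by omega⟩
      rw [hm, pv_scan_done pg m order order.length (le_refl _)]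
    · rw [if_neg hsame]
      have hgrow : order.length + 1 ≤ ((order.drop i).foldl (pvExpand1 pg) order).length := by
        have h2 := hlenmono
        rw [← hsplit] at h2 ⊢
        omega
      have hinv' : pvInv s pg ((order.drop i).foldl (pvExpand1 pg) order) := by
        constructor
        · exact pv_nodup_foldl_expand pg (order.drop i) order hinv.1
        · intro z hz
          rcases pv_mem_foldl_expand pg (order.drop i) order hz with h1 | h1
          · exact hinv.2 z h1
          · simp [h1]
      have htake : ((order.drop i).foldl (pvExpand1 pg) order).take order.length = order := by
        rw [← happ, List.take_left]
      have hclosed' : pvClosed pg ((order.drop i).foldl (pvExpand1 pg) order) order.length := by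
        intro x hx y hy
        rw [htake] at hx
        by_cases hxi : x ∈ order.take i
        · exact (List.IsPrefix.subset ⟨app, happ⟩) (hclosed x hxi y hy)
        · have hxdrop : x ∈ order.drop i := by
            rcases List.mem_append.mp ((List.take_append_drop i order).symm ▸ hx) with h1 | h1
            · exact absurd h1 hxi
            · exact h1
          exact pv_nbrs_in_foldl_expand pg (order.drop i) order x hxdrop y hy
      have hrec := ih ((order.drop i).foldl (pvExpand1 pg) order) order.length
        (fs - (order.drop i).length) hinv' hlenmono hclosed' (by omega) (by omega)
      rw [hsplit, hrec, hchunk]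

-- ===== VERDICT (by name: the statement is the Claim_ definition above) =====
theorem find_connected_lines_spec : Claim_equal_find_connected_lines := by
  intro start_idx pg _
  unfold Spec_find_connected_lines find_connected_lines find_connected_lines_alt
  have h0 : PySem.Set.ofList [start_idx] = [start_idx] := by
    simp [PySem.Set.ofList_eq_foldl, PySem.Set.add, PySem.Set.contains]
  rw [h0]
  have hA : pvALoop pg (pvFuel pg) [] [start_idx] = pvScan pg (pvFuel pg) [start_idx] 0 := by
    have := pv_loop_eq pg (pvFuel pg) [] [start_idx] (by simp)
    simpa using this
  have hB : pvBFix pg (pvFuel pg) [start_idx] = pvScan pg (pvFuel pg) [start_idx] 0 := by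
    refine pv_fix_scan start_idx pg (pvFuel pg) [start_idx] 0 (pvFuel pg)
      ⟨by simp, by intro x hx; simp at hx; simp [hx]⟩ (by simp) ?_ (by simp) (by simp)
    intro x hx
    simp at hx
  rw [hA, hB]
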